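-- pv_equiv track=rewrite | github.com/alvaronaschez/amazon | amazon_assessment_demo.py | cellCompete
-- ===== SOURCE A (Python) =====
-- def cellCompete(states, days):
--     states = states[:]
--     for _ in range(days):
--         prev = 0
--         for i in range(len(states)):
--             x = states[i]
--             if i+1 == len(states):
--                 post = 0
--             else:
--                 post = states[i+1]
--             if post == prev:
--                 states[i] = 0
--             else:
--                 states[i] = 1
--             prev = x
--     return states
-- ===== SOURCE B (Python) =====
-- def _step(s):
--     # one day: each cell becomes 0 iff its two neighbours (0 beyond the ends) are equal
--     return [0 if a == c else 1 for a, _, c in zip([0] + s, s, s[1:] + [0])]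
--
--
-- def cellCompete(states, days):
--     cur = list(states)
--     seen = {}
--     d = 0
--     while d < days:
--         key = tuple(cur)
--         if key in seen:
--             start = seen[key]
--             rem = (days - start) % (d - start)
--             for _ in range(rem):
--                 cur = _step(cur)
--             return cur
--         seen[key] = d
--         cur = _step(cur)
--         d += 1
--     return cur
-- ===== Notes on version B (the rewrite author's own statement) =====
-- stated objective: alternative
-- what changed: B replaces A's day-by-day simulation with cycle detection on the sequence of whole-list states (a dict of seen states) and finishes with the remaining day count reduced modulo the detected cycle length; the one-day step is a pure zip over shifted lists instead of A's in-place index loop with a carried prev.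
import Mathlib
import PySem

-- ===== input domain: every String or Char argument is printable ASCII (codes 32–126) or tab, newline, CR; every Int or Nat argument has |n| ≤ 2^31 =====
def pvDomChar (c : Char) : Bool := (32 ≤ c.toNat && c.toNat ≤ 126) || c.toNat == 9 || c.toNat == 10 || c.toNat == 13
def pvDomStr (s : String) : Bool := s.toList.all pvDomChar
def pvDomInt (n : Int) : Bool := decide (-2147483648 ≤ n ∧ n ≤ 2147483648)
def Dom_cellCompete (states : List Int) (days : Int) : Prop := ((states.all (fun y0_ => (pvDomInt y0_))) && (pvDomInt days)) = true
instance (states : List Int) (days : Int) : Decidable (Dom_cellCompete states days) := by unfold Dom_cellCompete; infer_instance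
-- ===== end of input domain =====

-- B replaces A's day-by-day simulation (days passes over the list) by cycle detection on
-- the sequence of states (a dict of already-seen states), finishing with the day count
-- reduced modulo the detected cycle length; the one-day step is a pure zip over shifted
-- lists instead of A's in-place index loop. Same return value on every input.

-- ===== PORT A =====
-- one outer iteration of A: 'prev = 0; for i in range(len(states)): …' with in-place writes
def cellCompeteDay (states : List Int) : List Int :=
  ((PySem.List.pyRange 0 (states.length : Int) 1).foldl
    (fun (st : List Int × Int) i =>
      let s := st.1
      let prev := st.2
      let x := PySem.List.pyGetD s i 0
      let post := if i + 1 = (s.length : Int) then 0 else PySem.List.pyGetD s (i + 1) 0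
      (PySem.List.pySetD s i (if post = prev then 0 else 1), x))
    (states, 0)).1

def cellCompete (states : List Int) (days : Int) : List Int :=
  (PySem.List.pyRange 0 days 1).foldl (fun s _ => cellCompeteDay s) states

-- ===== PORT B =====
-- Source B's _step: the comprehension over zip([0] + s, s, s[1:] + [0])
def zipStep : List Int → List Int → List Int → List Int
  | a :: as, _ :: bs, c :: cs => (if a = c then 0 else 1) :: zipStep as bs cs
  | _, _, _ => []

def stepB (s : List Int) : List Int := zipStep (0 :: s) s (s.drop 1 ++ [0])

-- Source B's 'while d < days' loop with the seen-states dict and the modular finish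
def loopB (cur : List Int) (seen : PySem.Dict (List Int) Int) (d days : Int) : List Int :=
  if _h : d < days then
    match seen.get? cur with
    | some start =>
        let rem := PySem.Int.mod (days - start) (d - start)
        (PySem.List.pyRange 0 rem 1).foldl (fun s _ => stepB s) cur
    | none => loopB (stepB cur) (seen.insert cur d) (d + 1) days
  else cur
termination_by (days - d).toNat
decreasing_by omega

def cellCompete_alt (states : List Int) (days : Int) : List Int :=
  loopB states PySem.Dict.empty 0 days

-- ===== PRECONDITION & SPEC =====
def Spec_cellCompete (states : List Int) (days : Int) (out : List Int) : Prop := out = cellCompete_alt states days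
instance (states : List Int) (days : Int) (out : List Int) : Decidable (Spec_cellCompete states days out) := by unfold Spec_cellCompete; infer_instance

-- ===== CLAIM (what is proved, stated in full; the proofs are below) =====
def Claim_equal_cellCompete : Prop := ∀ (states : List Int) (days : Int), Dom_cellCompete states days → Spec_cellCompete states days (cellCompete states days)

-- ===== LEMMAS AND PROOFS =====

-- a fold that ignores the list's elements is function iteration
lemma foldl_const_iterate {α β : Type} (f : α → α) (l : List β) (init : α) :
    l.foldl (fun s _ => f s) init = f^[l.length] init := by
  induction l generalizing init with
  | nil => rfl
  | cons x xs ih => simp [List.foldl_cons, ih, Function.iterate_succ_apply]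

lemma getD_append_length (pre : List Int) (a : Int) (rest : List Int) (d : Int) :
    (pre ++ a :: rest).getD pre.length d = a := by
  simp [List.getD]

lemma set_append_length (pre : List Int) (a : Int) (rest : List Int) (v : Int) :
    (pre ++ a :: rest).set pre.length v = pre ++ v :: rest := by
  rw [List.set_append_right _ _ (Nat.le_refl pre.length)]
  simp

-- A's inner index loop, generalized: rewriting the suffix 'suf' in place behind prefix 'pre'
lemma innerLoop (suf pre : List Int) (prev : Int) :
    (PySem.List.pyRange (pre.length : Int) ((pre.length : Int) + (suf.length : Int)) 1).foldl
      (fun (st : List Int × Int) i =>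
        let s := st.1
        let prev := st.2
        let x := PySem.List.pyGetD s i 0
        let post := if i + 1 = (s.length : Int) then 0 else PySem.List.pyGetD s (i + 1) 0
        (PySem.List.pySetD s i (if post = prev then 0 else 1), x))
      (pre ++ suf, prev)
    = (pre ++ zipStep (prev :: suf) suf (suf.drop 1 ++ [0]), suf.getLastD prev) := by
  set F : List Int × Int → Int → List Int × Int := (fun (st : List Int × Int) i =>
        let s := st.1
        let prev := st.2
        let x := PySem.List.pyGetD s i 0
        let post := if i + 1 = (s.length : Int) then 0 else PySem.List.pyGetD s (i + 1) 0
        (PySem.List.pySetD s i (if post = prev then 0 else 1), x)) with hF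
  induction suf generalizing pre prev with
  | nil =>
      rw [PySem.List.pyRange_one_eq_nil (by simp)]
      simp [zipStep]
  | cons a rest ih =>
      rw [PySem.List.pyRange_one_cons
        (by simp only [List.length_cons]; push_cast; omega)]
      rw [List.foldl_cons]
      have hx : PySem.List.pyGetD (pre ++ a :: rest) (pre.length : Int) 0 = a := by
        simp [List.getD]
      have hset : ∀ v : Int, PySem.List.pySetD (pre ++ a :: rest) (pre.length : Int) v
          = pre ++ v :: rest := by
        intro v
        have := PySem.List.pySetD_natCast (pre ++ a :: rest) pre.length v
        rw [this, set_append_length]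
      cases rest with
      | nil =>
          have hlen : (pre.length : Int) + 1 = (((pre ++ a :: ([] : List Int)).length : Nat) : Int) := by
            simp
          have happ : F (pre ++ a :: [], prev) (pre.length : Int)
              = (pre ++ (if prev = (0:Int) then (0:Int) else 1) :: [], a) := by
            simp only [hF, hx, hset, if_pos hlen]
            rw [show (if (0:Int) = prev then (0:Int) else 1) = (if prev = 0 then 0 else 1) by
              by_cases h : prev = 0 <;> simp [h, eq_comm]]
          rw [happ]
          rw [show ((pre.length : Int) + ((a :: ([]:List Int)).length : Int)) = (pre.length : Int) + 1 by simp]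
          rw [PySem.List.pyRange_one_eq_nil le_rfl]
          simp [zipStep]
      | cons c rest' =>
          have hlen : ¬ ((pre.length : Int) + 1 = (((pre ++ a :: c :: rest').length : Nat) : Int)) := by
            simp only [List.length_append, List.length_cons]; push_cast; omega
          have hpost : PySem.List.pyGetD (pre ++ a :: c :: rest') ((pre.length : Int) + 1) 0 = c := by
            have h1 : ((pre.length : Int) + 1) = (((pre ++ [a]).length : Nat) : Int) := by simp
            have h2 : pre ++ a :: c :: rest' = (pre ++ [a]) ++ c :: rest' := by simp
            rw [h1, PySem.List.pyGetD_natCast, h2]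
            exact getD_append_length (pre ++ [a]) c rest' 0
          have happ : F (pre ++ a :: c :: rest', prev) (pre.length : Int)
              = (pre ++ (if prev = c then (0:Int) else 1) :: c :: rest', a) := by
            simp only [hF, hx, hset, if_neg hlen, hpost]
            rw [show (if c = prev then (0:Int) else 1) = (if prev = c then 0 else 1) by
              by_cases h : prev = c <;> simp [h, eq_comm]]
          rw [happ]
          have hrange : PySem.List.pyRange ((pre.length : Int) + 1)
              ((pre.length : Int) + ((a :: c :: rest').length : Int)) 1
              = PySem.List.pyRange (((pre ++ [if prev = c then (0:Int) else 1]).length : Nat) : Int)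
                ((((pre ++ [if prev = c then (0:Int) else 1]).length : Nat) : Int) + (((c :: rest').length : Nat) : Int)) 1 := by
            simp only [List.length_append, List.length_cons, List.length_nil]
            push_cast
            ring_nf
          rw [hrange]
          have hpre : pre ++ (if prev = c then (0:Int) else 1) :: c :: rest'
              = (pre ++ [if prev = c then (0:Int) else 1]) ++ c :: rest' := by
            simp
          rw [hpre, ih]
          have hsome : (c :: rest').getLast?.isSome := by simp
          obtain ⟨x, hx'⟩ := Option.isSome_iff_exists.mp hsome
          simp [zipStep, List.append_assoc, hx']

lemma cellCompeteDay_eq_stepB (s : List Int) : cellCompeteDay s = stepB s := by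
  unfold cellCompeteDay stepB
  have := innerLoop s [] 0
  simp only [List.length_nil, List.nil_append, Nat.cast_zero, zero_add] at this
  rw [this]

lemma cellCompete_eq_iterate (states : List Int) (days : Int) :
    cellCompete states days = stepB^[days.toNat] states := by
  unfold cellCompete
  rw [PySem.List.foldl_congr_mem (PySem.List.pyRange 0 days 1)
    (fun s (_ : Int) => cellCompeteDay s) (fun s _ => stepB s) states
    (by intro acc x _; simp [cellCompeteDay_eq_stepB])]
  rw [foldl_const_iterate, PySem.List.length_pyRange_one]
  congr 1
  omega

-- eventual periodicity: if f revisits at index a + p what it produced at index a,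
-- every later index reduces modulo p
lemma iterate_period {α : Type} (f : α → α) (x : α) (a p : ℕ) (hp : 0 < p)
    (h : f^[a + p] x = f^[a] x) :
    ∀ m, a ≤ m → f^[m] x = f^[a + (m - a) % p] x := by
  intro m
  induction m using Nat.strong_induction_on with
  | _ m ih =>
    intro ham
    by_cases hbig : a + p ≤ m
    · have h1 : f^[m] x = f^[m - p] x := by
        have hm : m = (m - (a + p)) + (a + p) := by omega
        rw [hm, Function.iterate_add_apply, h, ← Function.iterate_add_apply]
        congr 1; omega
      rw [h1, ih (m - p) (by omega) (by omega)]
      congr 2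
      rw [Nat.mod_eq_sub_mod (by omega : p ≤ m - a)]
      congr 1; omega
    · have hlt : (m - a) % p = m - a := Nat.mod_eq_of_lt (by omega)
      rw [hlt]
      congr 1; omega

-- the B loop computes exactly stepB iterated 'days' times, under its dict invariant
lemma loopB_eq (s0 : List Int) (days : Int) :
    ∀ (cur : List Int) (seen : PySem.Dict (List Int) Int) (d : Int),
      0 ≤ d → d ≤ days → cur = stepB^[d.toNat] s0 →
      (∀ k v, seen.get? k = some v → 0 ≤ v ∧ v < d ∧ stepB^[v.toNat] s0 = k) →
      loopB cur seen d days = stepB^[days.toNat] s0 := by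
  intro cur seen d
  induction cur, seen, d using loopB.induct (days := days) with
  | case1 cur seen d hlt start hget =>
      intro hd0 hdd hcur hseen
      rw [loopB]
      simp only [dif_pos hlt, hget]
      obtain ⟨hv0, hvd, hvs⟩ := hseen cur start hget
      set a := start.toNat with ha
      set p := (d - start).toNat with hp
      have hper : stepB^[a + p] s0 = stepB^[a] s0 := by
        rw [show a + p = d.toNat by omega, ← hcur, hvs]
      have hmod : (PySem.Int.mod (days - start) (d - start)).toNat = (days.toNat - a) % p := by
        rw [PySem.Int.mod_eq_emod_of_pos (by omega : (0:Int) < d - start)]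
        rw [show days - start = ((days.toNat - a : Nat) : Int) by omega,
            show d - start = ((p : Nat) : Int) by omega,
            ← Int.natCast_mod]
        omega
      simp only [foldl_const_iterate, PySem.List.length_pyRange_one]
      rw [hcur, ← Function.iterate_add_apply]
      rw [show (PySem.Int.mod (days - start) (d - start) - 0).toNat + d.toNat
            = (days.toNat - a) % p + (a + p) by omega]
      have e1 : stepB^[(days.toNat - a) % p + (a + p)] s0
          = stepB^[a + (days.toNat - a) % p] s0 := by
        rw [Function.iterate_add_apply, hper, ← Function.iterate_add_apply]
        congr 1; omega
      rw [e1]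
      exact (iterate_period stepB s0 a p (by omega) hper days.toNat (by omega)).symm
  | case2 cur seen d hlt hget ih =>
      intro hd0 hdd hcur hseen
      rw [loopB]
      simp only [dif_pos hlt, hget]
      apply ih (by omega) (by omega)
      · rw [hcur, show (d+1).toNat = d.toNat + 1 by omega, Function.iterate_succ_apply']
      · intro k v hkv
        rw [PySem.Dict.get?_insert] at hkv
        by_cases hk : k = cur
        · rw [if_pos hk] at hkv
          obtain rfl : v = d := by injection hkv with h; omega
          exact ⟨hd0, by omega, by rw [← hcur, hk]⟩
        · rw [if_neg hk] at hkv
          obtain ⟨h1, h2, h3⟩ := hseen k v hkv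
          exact ⟨h1, by omega, h3⟩
  | case3 cur seen d hlt =>
      intro hd0 hdd hcur hseen
      rw [loopB]
      simp only [dif_neg hlt]
      rw [hcur]
      congr 1; omega

lemma cellCompete_alt_eq_iterate (states : List Int) (days : Int) :
    cellCompete_alt states days = stepB^[days.toNat] states := by
  unfold cellCompete_alt
  by_cases h : 0 ≤ days
  · apply loopB_eq states days states PySem.Dict.empty 0 le_rfl h (by simp)
    intro k v hkv
    simp [PySem.Dict.get?_empty] at hkv
  · rw [loopB]
    simp only [dif_neg (by omega : ¬ (0 : Int) < days)]
    rw [show days.toNat = 0 by omega]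
    rfl

-- ===== VERDICT (by name: the statement is the Claim_ definition above) =====
theorem cellCompete_spec : Claim_equal_cellCompete := by
  intro states days _
  unfold Spec_cellCompete
  rw [cellCompete_eq_iterate, cellCompete_alt_eq_iterate]
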